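-- pv_equiv track=rewrite | github.com/ladyya0306/AtlasMarketEngine | scripts/analyze_profile_monthly_demand_supply.py | _pending_and_filled_by_month
-- ===== SOURCE A (Python) =====
-- from collections import defaultdict
--
-- def _pending_and_filled_by_month(order_rows, tx_by_month, bucket_by_agent, months):
--     pending_end = defaultdict(lambda: defaultdict(set))
--     filled_end = defaultdict(lambda: defaultdict(set))
--     filled_cumulative = defaultdict(set)
--
--     for month in months:
--         for bucket_id, buyers in tx_by_month.get(month, {}).items():
--             filled_cumulative[bucket_id].update(int(x) for x in buyers)
--         for bucket_id, buyers in filled_cumulative.items():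
--             filled_end[month][bucket_id] = set(int(x) for x in buyers)
--
--         for _order_id, created_month, close_month, status, buyer_id in order_rows:
--             created_month = int(created_month or 0)
--             if created_month > month:
--                 continue
--             close_month = int(close_month) if close_month is not None else None
--             bucket_id = bucket_by_agent.get(int(buyer_id), "")
--             if not bucket_id:
--                 continue
--             is_pending_at_month_end = close_month is None or close_month > month
--             if is_pending_at_month_end:
--                 pending_end[month][bucket_id].add(int(buyer_id))
--
--     return pending_end, filled_end
-- ===== SOURCE B (Python) =====
-- from bisect import bisect_left
--
--
-- def _pending_and_filled_by_month(order_rows, tx_by_month, bucket_by_agent, months):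
--     # Distribute each order once over its pending month-range (binary search on the
--     # sorted distinct months) instead of rescanning every order for every month.
--     uniq = sorted(set(months))
--     adds_by_month = {m: [] for m in uniq}
--     for _order_id, created_month, close_month, status, buyer_id in order_rows:
--         created = int(created_month or 0)
--         bucket_id = bucket_by_agent.get(int(buyer_id), "")
--         if not bucket_id:
--             continue
--         lo = bisect_left(uniq, created)
--         hi = len(uniq) if close_month is None else bisect_left(uniq, int(close_month))
--         for m in uniq[lo:hi]:
--             adds_by_month[m].append((bucket_id, int(buyer_id)))
--
--     pending_end = {}
--     filled_end = {}
--     filled_cumulative = {}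
--     for month in months:
--         for bucket_id, buyers in tx_by_month.get(month, {}).items():
--             filled_cumulative.setdefault(bucket_id, set()).update(int(x) for x in buyers)
--         if filled_cumulative:
--             filled_end[month] = {b: set(s) for b, s in filled_cumulative.items()}
--         adds = adds_by_month[month]
--         if adds:
--             d = pending_end.setdefault(month, {})
--             for bucket_id, buyer_id in adds:
--                 d.setdefault(bucket_id, set()).add(buyer_id)
--     return pending_end, filled_end
-- ===== Notes on version B (the rewrite author's own statement) =====
-- stated objective: alternative
-- what changed: Instead of rescanning every order row for every month (nested month-by-order loops), B binary-searches each order's pending month-range once in the sorted distinct months and distributes its (bucket, buyer) contribution to exactly those months, then assembles the per-month dicts in one pass over the months.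
import Mathlib
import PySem

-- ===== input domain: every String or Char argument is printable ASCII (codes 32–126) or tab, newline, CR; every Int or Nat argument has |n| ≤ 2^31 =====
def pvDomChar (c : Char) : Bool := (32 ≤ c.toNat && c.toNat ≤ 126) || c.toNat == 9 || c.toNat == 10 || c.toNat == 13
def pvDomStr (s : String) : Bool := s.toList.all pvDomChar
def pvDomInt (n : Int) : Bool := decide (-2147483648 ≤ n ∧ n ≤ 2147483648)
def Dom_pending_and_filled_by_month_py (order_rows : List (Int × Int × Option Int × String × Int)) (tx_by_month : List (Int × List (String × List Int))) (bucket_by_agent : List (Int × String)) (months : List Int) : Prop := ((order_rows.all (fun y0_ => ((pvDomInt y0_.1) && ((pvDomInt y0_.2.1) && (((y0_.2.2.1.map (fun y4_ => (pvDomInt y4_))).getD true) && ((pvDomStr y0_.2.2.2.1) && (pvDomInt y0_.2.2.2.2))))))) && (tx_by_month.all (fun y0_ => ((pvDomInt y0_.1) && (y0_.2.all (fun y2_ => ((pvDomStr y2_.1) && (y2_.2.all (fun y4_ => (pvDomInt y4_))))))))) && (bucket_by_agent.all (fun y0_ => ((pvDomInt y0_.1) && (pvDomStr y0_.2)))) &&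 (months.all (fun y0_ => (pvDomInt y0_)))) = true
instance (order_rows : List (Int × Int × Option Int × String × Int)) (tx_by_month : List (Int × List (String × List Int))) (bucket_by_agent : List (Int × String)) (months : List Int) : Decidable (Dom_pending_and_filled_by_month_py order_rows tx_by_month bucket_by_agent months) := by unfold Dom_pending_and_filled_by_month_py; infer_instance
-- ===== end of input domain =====

-- ===== PORT A =====
-- B distributes each order once over its pending month-range (sorted distinct months + binary search)
-- instead of rescanning all orders for every month; return-value equivalence only (no mutation involved).
-- A-side helpers: the body of A's "for month in months" loop, as a named step function.
def aMonthStep (order_rows : List (Int × Int × Option Int × String × Int)) (tx_by_month : List (Int × List (String × List Int))) (bucket_by_agent : List (Int × String)) (st : PySem.Dict Int (PySem.Dict String (PySem.Set Int)) × PySem.Dict Int (PySem.Dict String (PySem.Set Int)) × PySem.Dict String (PySem.Set Int)) (month : Int) : PySem.Dict Int (PySem.Dict String (PySem.Set Int)) × PySem.Dict Int (PySem.Dict String (PySem.Set Int)) × PySem.Dict String (PySem.Set Int) :=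
  -- cum: for bucket_id, buyers in tx_by_month.get(month, {}).items(): filled_cumulative[bucket_id].update(int(x) for x in buyers)
  -- fill: for bucket_id, buyers in filled_cumulative.items(): filled_end[month][bucket_id] = set(int(x) for x in buyers)
  -- pend: for _order_id, created_month, close_month, status, buyer_id in order_rows: …
  --       (created_month = int(created_month or 0) is the identity on ints)
  (order_rows.foldl
    (fun p row =>
      if row.2.1 > month then p
      else
        if (bucket_by_agent.lookup row.2.2.2.2).getD "" = "" then p
        else
          if (match row.2.2.1 with | none => true | some c => decide (c > month)) then
            p.insert month ((p.getD month PySem.Dict.empty).insert ((bucket_by_agent.lookup row.2.2.2.2).getD "")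
              (PySem.Set.add ((p.getD month PySem.Dict.empty).getD ((bucket_by_agent.lookup row.2.2.2.2).getD "") PySem.Set.empty) row.2.2.2.2))
          else p) st.1,
   (((tx_by_month.lookup month).getD []).foldl
      (fun c bb => c.insert bb.1 (PySem.Set.update (c.getD bb.1 PySem.Set.empty) bb.2)) st.2.2).items.foldl
    (fun f bb => f.insert month ((f.getD month PySem.Dict.empty).insert bb.1 (PySem.Set.ofList bb.2))) st.2.1,
   ((tx_by_month.lookup month).getD []).foldl
    (fun c bb => c.insert bb.1 (PySem.Set.update (c.getD bb.1 PySem.Set.empty) bb.2)) st.2.2)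

def pending_and_filled_by_month_py (order_rows : List (Int × Int × Option Int × String × Int)) (tx_by_month : List (Int × List (String × List Int))) (bucket_by_agent : List (Int × String)) (months : List Int) : (List (Int × List (String × List Int))) × (List (Int × List (String × List Int))) :=
  let st := months.foldl (aMonthStep order_rows tx_by_month bucket_by_agent)
    (PySem.Dict.empty, PySem.Dict.empty, PySem.Dict.empty)
  (st.1.items.map (fun p => (p.1, p.2.items)), st.2.1.items.map (fun p => (p.1, p.2.items)))

-- ===== PORT B =====
-- B-side helpers: the body of B's order-distribution loop and of B's month loop, as named step functions.
def bAddsStep (bucket_by_agent : List (Int × String)) (uniq : List Int) (ad : PySem.Dict Int (List (String × Int))) (row : Int × Int × Option Int × String × Int) : PySem.Dict Int (List (String × Int)) :=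
  if (bucket_by_agent.lookup row.2.2.2.2).getD "" = "" then ad
  else
    (PySem.List.slice uniq (some ((PySem.List.bisectLeft uniq row.2.1 : Nat) : Int))
        (some (((match row.2.2.1 with
                 | none => uniq.length
                 | some c => PySem.List.bisectLeft uniq c) : Nat) : Int))).foldl
      (fun ad m => ad.insert m (ad.getD m [] ++ [((bucket_by_agent.lookup row.2.2.2.2).getD "", row.2.2.2.2)])) ad

def bMonthStep (adds : PySem.Dict Int (List (String × Int))) (tx_by_month : List (Int × List (String × List Int))) (st : PySem.Dict Int (PySem.Dict String (PySem.Set Int)) × PySem.Dict Int (PySem.Dict String (PySem.Set Int)) × PySem.Dict String (PySem.Set Int)) (month : Int) : PySem.Dict Int (PySem.Dict String (PySem.Set Int)) × PySem.Dict Int (PySem.Dict String (PySem.Set Int)) × PySem.Dict String (PySem.Set Int) :=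
  (if (adds.getD month []).isEmpty then st.1
   else st.1.insert month ((adds.getD month []).foldl
      (fun d bb => d.insert bb.1 (PySem.Set.add (d.getD bb.1 PySem.Set.empty) bb.2))
      (st.1.getD month PySem.Dict.empty)),
   (((tx_by_month.lookup month).getD []).foldl
      (fun c bb => c.insert bb.1 (PySem.Set.update (c.getD bb.1 PySem.Set.empty) bb.2)) st.2.2).items.foldl
    (fun f bb => f.insert month ((f.getD month PySem.Dict.empty).insert bb.1 (PySem.Set.ofList bb.2))) st.2.1,
   ((tx_by_month.lookup month).getD []).foldl
    (fun c bb => c.insert bb.1 (PySem.Set.update (c.getD bb.1 PySem.Set.empty) bb.2)) st.2.2)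

def pending_and_filled_by_month_py_alt (order_rows : List (Int × Int × Option Int × String × Int)) (tx_by_month : List (Int × List (String × List Int))) (bucket_by_agent : List (Int × String)) (months : List Int) : (List (Int × List (String × List Int))) × (List (Int × List (String × List Int))) :=
  let uniq := PySem.List.sorted (PySem.Set.ofList months) (fun x => x)
  let adds0 : PySem.Dict Int (List (String × Int)) := PySem.Dict.ofList (uniq.map (fun m => (m, [])))
  let adds := order_rows.foldl (bAddsStep bucket_by_agent uniq) adds0
  let st := months.foldl (bMonthStep adds tx_by_month)
    (PySem.Dict.empty, PySem.Dict.empty, PySem.Dict.empty)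
  (st.1.items.map (fun p => (p.1, p.2.items)), st.2.1.items.map (fun p => (p.1, p.2.items)))

-- ===== PRECONDITION & SPEC =====
def Spec_pending_and_filled_by_month_py (order_rows : List (Int × Int × Option Int × String × Int)) (tx_by_month : List (Int × List (String × List Int))) (bucket_by_agent : List (Int × String)) (months : List Int) (out : (List (Int × List (String × List Int))) × (List (Int × List (String × List Int)))) : Prop := out = pending_and_filled_by_month_py_alt order_rows tx_by_month bucket_by_agent months
instance (order_rows : List (Int × Int × Option Int × String × Int)) (tx_by_month : List (Int × List (String × List Int))) (bucket_by_agent : List (Int × String)) (months : List Int) (out : (List (Int × List (String × List Int))) × (List (Int × List (String × List Int)))) : Decidable (Spec_pending_and_filled_by_month_py order_rows tx_by_month bucket_by_agent months out) := by unfold Spec_pending_and_filled_by_month_py; exact instDecidableEqProd _ _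

-- ===== CLAIM (what is proved, stated in full; the proofs are below) =====
def Claim_equal_pending_and_filled_by_month_py : Prop := ∀ (order_rows : List (Int × Int × Option Int × String × Int)) (tx_by_month : List (Int × List (String × List Int))) (bucket_by_agent : List (Int × String)) (months : List Int), Dom_pending_and_filled_by_month_py order_rows tx_by_month bucket_by_agent months → Spec_pending_and_filled_by_month_py order_rows tx_by_month bucket_by_agent months (pending_and_filled_by_month_py order_rows tx_by_month bucket_by_agent months)

-- ===== LEMMAS AND PROOFS =====

lemma foldl_insert_one_key' {κ ν β : Type} [BEq κ] [LawfulBEq κ] (l : List β) (m : κ) (d0 : ν) (g : ν → β → ν) (p : PySem.Dict κ ν) :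
    l.foldl (fun p b => p.insert m (g (p.getD m d0) b)) p = (if l.isEmpty then p else p.insert m (l.foldl g (p.getD m d0))) := by
  induction l generalizing p with
  | nil => rfl
  | cons b t ih =>
    rw [List.foldl_cons, ih]
    cases t with
    | nil => simp
    | cons b2 t2 =>
      simp only [List.isEmpty_cons, Bool.false_eq_true, if_false]
      rw [PySem.Dict.getD_insert_self, PySem.Dict.insert_insert_self]; rfl

lemma foldl_match_filterMap {α β γ : Type} (f : α → Option β) (step : γ → β → γ) (l : List α) (init : γ) :
    l.foldl (fun acc r => (f r).elim acc (step acc)) init = (l.filterMap f).foldl step init := by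
  induction l generalizing init with
  | nil => rfl
  | cons r t ih =>
    simp only [List.foldl_cons, List.filterMap_cons]
    cases h : f r <;> simp [ih]

lemma getD_foldl_append_keys {κ β : Type} [BEq κ] [LawfulBEq κ] [DecidableEq κ] (ks : List κ) (hk : ks.Nodup) (ad : PySem.Dict κ (List β)) (v : β) (m : κ) :
    (ks.foldl (fun ad k => ad.insert k (ad.getD k [] ++ [v])) ad).getD m [] = ad.getD m [] ++ (if m ∈ ks then [v] else []) := by
  induction ks generalizing ad with
  | nil => simp
  | cons k t ih =>
    have hkt : k ∉ t := (List.nodup_cons.1 hk).1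
    simp only [List.foldl_cons]
    rw [ih (List.nodup_cons.1 hk).2]
    by_cases hm : m = k
    · subst hm
      rw [PySem.Dict.getD_insert_self]
      simp [hkt]
    · rw [PySem.Dict.getD_insert_of_ne _ _ _ hm]
      simp [List.mem_cons, hm]

lemma adds0_getD_aux {β : Type} (l : List Int) (d : PySem.Dict Int (List β)) (m : Int) (h : d.getD m [] = []) :
    (l.foldl (fun d mm => d.insert mm ([] : List β)) d).getD m [] = [] := by
  induction l generalizing d with
  | nil => exact h
  | cons k t ih =>
    simp only [List.foldl_cons]
    refine ih _ ?_
    by_cases hm : m = k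
    · subst hm; rw [PySem.Dict.getD_insert_self]
    · rw [PySem.Dict.getD_insert_of_ne _ _ _ hm]; exact h

lemma adds0_getD (uniq : List Int) (m : Int) :
    (PySem.Dict.ofList (uniq.map (fun m => (m, ([] : List (String × Int)))))).getD m [] = [] := by
  unfold PySem.Dict.ofList PySem.Dict.update
  rw [List.foldl_map]
  exact adds0_getD_aux uniq _ m (by rfl)

lemma sorted_window (l : List Int) (hs : l.Pairwise (· ≤ ·)) (P : Int → Bool)
    (hP : ∀ x y : Int, x ≤ y → P y = true → P x = true) (a : Int) (n1 n2 : Nat)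
    (h2len : n2 ≤ l.length)
    (h1 : ∀ j (hj : j < l.length), (j < n1 ↔ l[j] < a))
    (h2 : ∀ j (hj : j < l.length), (j < n2 ↔ P l[j] = true)) :
    (l.drop n1).take (n2 - n1) = l.filter (fun m => decide (a ≤ m) && P m) := by
  induction l generalizing n1 n2 with
  | nil => simp
  | cons h t ih =>
    have hh : ∀ y ∈ t, h ≤ y := (List.pairwise_cons.1 hs).1
    have ht : t.Pairwise (· ≤ ·) := (List.pairwise_cons.1 hs).2
    by_cases hha : h < a
    · have hn1 : 0 < n1 := (h1 0 (by simp)).2 (by simpa using hha)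
      obtain ⟨m1, rfl⟩ : ∃ m1, n1 = m1 + 1 := ⟨n1 - 1, by omega⟩
      cases n2 with
      | zero =>
        have hPh : ¬ P h = true := fun hp => by
          have := (h2 0 (by simp)).2 (by simpa using hp); omega
        simp only [Nat.zero_sub, List.take_zero]
        symm
        rw [List.filter_eq_nil_iff]
        intro m hm
        rcases List.mem_cons.1 hm with rfl | hmt
        · simp [hPh]
        · have : ¬ P m = true := fun hp => hPh (hP h m (hh m hmt) hp)
          simp [this]
      | succ m2 =>
        simp only [List.drop_succ_cons, Nat.succ_sub_succ]
        rw [List.filter_cons_of_neg (by simp [not_le.2 hha])]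
        exact ih ht m1 m2 (by simpa using h2len)
          (fun j hj => by simpa using h1 (j+1) (by simpa using Nat.succ_lt_succ hj))
          (fun j hj => by simpa using h2 (j+1) (by simpa using Nat.succ_lt_succ hj))
    · have hn1 : n1 = 0 := by
        by_contra hne
        have : (h :: t)[0] < a := (h1 0 (by simp)).1 (by omega)
        simp at this
        exact hha this
      subst hn1
      simp only [List.drop_zero, Nat.sub_zero]
      cases n2 with
      | zero =>
        have hPh : ¬ P h = true := fun hp => by
          have := (h2 0 (by simp)).2 (by simpa using hp); omega
        simp only [List.take_zero]
        symm
        rw [List.filter_eq_nil_iff]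
        intro m hm
        rcases List.mem_cons.1 hm with rfl | hmt
        · simp [hPh]
        · have : ¬ P m = true := fun hp => hPh (hP h m (hh m hmt) hp)
          simp [this]
      | succ m2 =>
        have hPh : P h = true := by
          have := (h2 0 (by simp)).1 (by omega); simpa using this
        have hah : a ≤ h := not_lt.1 hha
        rw [List.take_succ_cons, List.filter_cons_of_pos (by simp [hah, hPh])]
        congr 1
        have := ih ht 0 m2 (by simpa using h2len)
          (fun j hj => by
            constructor
            · omega
            · intro hlt
              exact absurd hlt (not_lt.2 (hah.trans (hh _ (List.getElem_mem hj)))))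
          (fun j hj => by simpa using h2 (j+1) (by simpa using Nat.succ_lt_succ hj))
        simpa using this

lemma bisectLeft_iff (l : List Int) (x : Int) (hs : l.Pairwise (· ≤ ·)) :
    PySem.List.bisectLeft l x ≤ l.length ∧
      ∀ j (hj : j < l.length), (j < PySem.List.bisectLeft l x ↔ l[j] < x) := by
  obtain ⟨hle, hlt, hge⟩ := PySem.List.bisectLeft_spec l x hs
  refine ⟨hle, fun j hj => ⟨fun h => hlt j hj h, fun h => ?_⟩⟩
  by_contra hc
  exact absurd (hge j hj (by omega)) (not_le.2 h)

lemma slice_eq_filter_pending (uniq : List Int) (hu : uniq.Pairwise (· ≤ ·)) (a : Int) (close : Option Int) :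
    PySem.List.slice uniq (some ((PySem.List.bisectLeft uniq a : Nat) : Int))
      (some (((match close with | none => uniq.length | some c => PySem.List.bisectLeft uniq c) : Nat) : Int))
    = uniq.filter (fun m => decide (a ≤ m) && (match close with | none => true | some c => decide (m < c))) := by
  obtain ⟨h1le, h1⟩ := bisectLeft_iff uniq a hu
  cases close with
  | none =>
    rw [PySem.List.slice_natCast]
    exact sorted_window uniq hu (fun _ => true) (fun _ _ _ h => h) a _ _ le_rfl h1
      (fun j hj => by simpa using hj)
  | some c =>
    obtain ⟨h2le, h2⟩ := bisectLeft_iff uniq c hu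
    rw [PySem.List.slice_natCast]
    exact sorted_window uniq hu (fun m => decide (m < c))
      (fun x y hxy hy => by simp at hy ⊢; omega) a _ _ h2le h1
      (fun j hj => by simpa using h2 j hj)

-- The option-valued condition of A's inner order loop: which (bucket, buyer) pair (if any)
-- the order row contributes to month `month`.
def condRow (bucket_by_agent : List (Int × String)) (month : Int) (row : Int × Int × Option Int × String × Int) : Option (String × Int) :=
  if row.2.1 > month then none
  else if (bucket_by_agent.lookup row.2.2.2.2).getD "" = "" then none
  else if (match row.2.2.1 with | none => true | some c => decide (c > month)) then
    some ((bucket_by_agent.lookup row.2.2.2.2).getD "", row.2.2.2.2)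
  else none

lemma condRow_of_bucket_empty (bba : List (Int × String)) (m : Int) (row : Int × Int × Option Int × String × Int)
    (hb : (bba.lookup row.2.2.2.2).getD "" = "") : condRow bba m row = none := by
  unfold condRow
  split_ifs <;> simp_all

lemma condRow_of_bucket_ne (bba : List (Int × String)) (m : Int) (row : Int × Int × Option Int × String × Int)
    (hb : ¬ (bba.lookup row.2.2.2.2).getD "" = "") :
    condRow bba m row =
      (if (decide (row.2.1 ≤ m) && (match row.2.2.1 with | none => true | some c => decide (m < c))) then
        some ((bba.lookup row.2.2.2.2).getD "", row.2.2.2.2) else none) := by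
  unfold condRow
  by_cases h1 : row.2.1 > m
  · rw [if_pos h1, if_neg (by simp [not_le.2 h1])]
  · rw [if_neg h1, if_neg hb]
    cases hc : row.2.2.1 with
    | none => simp [not_lt.1 h1]
    | some c =>
      by_cases h2 : m < c
      · simp [h2, not_lt.1 h1]
      · simp [h2, not_lt.1 h1]

-- the adds dictionary built by B holds, at each month of uniq, exactly the contributions A collects
lemma adds_invariant (bucket_by_agent : List (Int × String)) (uniq : List Int) (hu : uniq.Pairwise (· < ·)) (rows : List (Int × Int × Option Int × String × Int)) (ad : PySem.Dict Int (List (String × Int))) (m : Int) (hm : m ∈ uniq) :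
    (rows.foldl (bAddsStep bucket_by_agent uniq) ad).getD m [] = ad.getD m [] ++ rows.filterMap (condRow bucket_by_agent m) := by
  have hle : uniq.Pairwise (· ≤ ·) := hu.imp (fun h => le_of_lt h)
  have hnd : uniq.Nodup := hu.imp (fun h => ne_of_lt h)
  induction rows generalizing ad with
  | nil => simp
  | cons r t ih =>
    simp only [List.foldl_cons, List.filterMap_cons]
    by_cases hb : (bucket_by_agent.lookup r.2.2.2.2).getD "" = ""
    · rw [show bAddsStep bucket_by_agent uniq ad r = ad by unfold bAddsStep; rw [if_pos hb]]
      rw [ih ad, condRow_of_bucket_empty _ _ _ hb]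
    · have hstep : bAddsStep bucket_by_agent uniq ad r =
          (uniq.filter (fun mm => decide (r.2.1 ≤ mm) && (match r.2.2.1 with | none => true | some c => decide (mm < c)))).foldl
            (fun ad mm => ad.insert mm (ad.getD mm [] ++ [((bucket_by_agent.lookup r.2.2.2.2).getD "", r.2.2.2.2)])) ad := by
        unfold bAddsStep
        rw [if_neg hb, slice_eq_filter_pending uniq hle r.2.1 r.2.2.1]
      rw [hstep, ih, getD_foldl_append_keys _ (hnd.filter _), condRow_of_bucket_ne _ _ _ hb]
      by_cases hmem : (decide (r.2.1 ≤ m) && (match r.2.2.1 with | none => true | some c => decide (m < c))) = true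
      · rw [if_pos hmem, if_pos (List.mem_filter.2 ⟨hm, hmem⟩)]
        simp
      · rw [if_neg hmem]
        have hnotmem : m ∉ List.filter (fun mm => decide (r.2.1 ≤ mm) && (match r.2.2.1 with | none => true | some c => decide (mm < c))) uniq :=
          fun hc => hmem (List.mem_filter.1 hc).2
        rw [if_neg hnotmem]
        simp

-- A's per-row body is the match on condRow
lemma arow_eq_condRow (bucket_by_agent : List (Int × String)) (month : Int) (p : PySem.Dict Int (PySem.Dict String (PySem.Set Int))) (row : Int × Int × Option Int × String × Int) :
    (if row.2.1 > month then p
     else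
       if (bucket_by_agent.lookup row.2.2.2.2).getD "" = "" then p
       else
         if (match row.2.2.1 with | none => true | some c => decide (c > month)) then
           p.insert month ((p.getD month PySem.Dict.empty).insert ((bucket_by_agent.lookup row.2.2.2.2).getD "")
             (PySem.Set.add ((p.getD month PySem.Dict.empty).getD ((bucket_by_agent.lookup row.2.2.2.2).getD "") PySem.Set.empty) row.2.2.2.2))
         else p)
    = (condRow bucket_by_agent month row).elim p (fun bb => p.insert month ((p.getD month PySem.Dict.empty).insert bb.1
        (PySem.Set.add ((p.getD month PySem.Dict.empty).getD bb.1 PySem.Set.empty) bb.2))) := by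
  unfold condRow
  by_cases h1 : row.2.1 > month
  · simp [h1]
  · by_cases hb : (bucket_by_agent.lookup row.2.2.2.2).getD "" = ""
    · simp [h1, hb]
    · by_cases h2 : (match row.2.2.1 with | none => true | some c => decide (c > month)) = true
      · simp [h1, hb, h2]
      · simp [h1, hb, h2]

-- A's month step equals B's month step at every month of the list
lemma monthStep_eq (order_rows : List (Int × Int × Option Int × String × Int)) (tx_by_month : List (Int × List (String × List Int))) (bucket_by_agent : List (Int × String)) (months : List Int) (st : PySem.Dict Int (PySem.Dict String (PySem.Set Int)) × PySem.Dict Int (PySem.Dict String (PySem.Set Int)) × PySem.Dict String (PySem.Set Int)) (m : Int) (hm : m ∈ months) :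
    aMonthStep order_rows tx_by_month bucket_by_agent st m
    = bMonthStep (order_rows.foldl (bAddsStep bucket_by_agent (PySem.List.sorted (PySem.Set.ofList months) (fun x => x))) (PySem.Dict.ofList ((PySem.List.sorted (PySem.Set.ofList months) (fun x => x)).map (fun m => (m, []))))) tx_by_month st m := by
  have hu : (PySem.List.sorted (PySem.Set.ofList months) (fun x => x)).Pairwise (· < ·) :=
    PySem.List.sorted_ofList_pairwise_lt months
  have hmu : m ∈ PySem.List.sorted (PySem.Set.ofList months) (fun x => x) := by
    rw [PySem.List.mem_sorted]
    exact (PySem.Set.mem_ofList _ _).2 hm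
  have hads : (order_rows.foldl (bAddsStep bucket_by_agent (PySem.List.sorted (PySem.Set.ofList months) (fun x => x))) (PySem.Dict.ofList ((PySem.List.sorted (PySem.Set.ofList months) (fun x => x)).map (fun m => (m, []))))).getD m []
      = order_rows.filterMap (condRow bucket_by_agent m) := by
    rw [adds_invariant bucket_by_agent _ hu order_rows _ m hmu, adds0_getD]
    simp
  unfold aMonthStep bMonthStep
  congr 1
  rw [PySem.List.foldl_congr_mem order_rows _
      (fun p row => (condRow bucket_by_agent m row).elim p (fun bb => p.insert m ((p.getD m PySem.Dict.empty).insert bb.1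
        (PySem.Set.add ((p.getD m PySem.Dict.empty).getD bb.1 PySem.Set.empty) bb.2)))) st.1
      (fun p row _ => arow_eq_condRow bucket_by_agent m p row)]
  rw [foldl_match_filterMap (condRow bucket_by_agent m)
      (fun p bb => p.insert m ((p.getD m PySem.Dict.empty).insert bb.1
        (PySem.Set.add ((p.getD m PySem.Dict.empty).getD bb.1 PySem.Set.empty) bb.2))) order_rows st.1]
  rw [foldl_insert_one_key' (List.filterMap (condRow bucket_by_agent m) order_rows) m PySem.Dict.empty
      (fun d bb => d.insert bb.1 (PySem.Set.add (d.getD bb.1 PySem.Set.empty) bb.2)) st.1]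
  rw [hads]

-- ===== VERDICT (by name: the statement is the Claim_ definition above) =====
theorem pending_and_filled_by_month_py_spec : Claim_equal_pending_and_filled_by_month_py := by
  intro order_rows tx_by_month bucket_by_agent months _
  unfold Spec_pending_and_filled_by_month_py
  unfold pending_and_filled_by_month_py pending_and_filled_by_month_py_alt
  rw [PySem.List.foldl_congr_mem months _ _ _
    (fun st m hm => monthStep_eq order_rows tx_by_month bucket_by_agent months st m hm)]
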